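-- pv_equiv track=rewrite | github.com/sultonmuhajir/crusader | Python/group_by_commas.py | group_by_commas
-- ===== SOURCE A (Python) =====
-- def group_by_commas(n):
--    res = []
--    x = list(reversed(str(n)))
--    for i in range(len(x)):
--       if i % 3 == 0 and i != 0:
--          res.append(',')
--       res.append(x[i])
--    return ''.join(list(reversed(res)))
-- ===== SOURCE B (Python) =====
-- def group_by_commas(n):
--     s = str(n)
--     parts = []
--     while s:
--         parts.append(s[-3:])
--         s = s[:-3]
--     return ','.join(reversed(parts))
-- ===== Notes on version B (the rewrite author's own statement) =====
-- stated objective: simpler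
-- what changed: Replaces the per-character reversed loop with a modulo-indexed comma test by peeling three-character slices off the right of str(n) and joining them with commas.
import Mathlib
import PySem

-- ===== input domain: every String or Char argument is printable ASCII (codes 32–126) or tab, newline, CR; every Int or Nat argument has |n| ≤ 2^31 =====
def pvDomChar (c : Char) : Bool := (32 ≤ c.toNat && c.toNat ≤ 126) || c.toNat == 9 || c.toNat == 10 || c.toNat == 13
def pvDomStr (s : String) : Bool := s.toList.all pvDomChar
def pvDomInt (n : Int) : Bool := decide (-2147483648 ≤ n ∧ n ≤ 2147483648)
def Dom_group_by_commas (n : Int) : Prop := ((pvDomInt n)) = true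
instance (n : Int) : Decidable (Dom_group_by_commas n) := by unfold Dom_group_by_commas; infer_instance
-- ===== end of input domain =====

-- B replaces A's per-character loop with a modulo comma test by peeling 3-character
-- slices off the right of str(n) and comma-joining them (objective: simpler).

-- ===== PORT A =====
-- for i in range(len(x)): transliterated as index recursion; x[i] is in range, ported via getD
def aLoop (x : List Char) (i : Nat) (res : List Char) : List Char :=
  if i < x.length then
    let res := if i % 3 == 0 && i != 0 then res ++ [','] else res
    aLoop x (i + 1) (res ++ [x.getD i ' '])
  else res
termination_by x.length - i

def group_by_commas (n : Int) : String :=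
  let x := (PySem.Int.toStr n).toList.reverse
  let res := aLoop x 0 []
  String.mk res.reverse

-- ===== PORT B =====
-- the while loop: peel s[-3:] off the right, recursing on s[:-3]
def peelChunks (s : List Char) (parts : List (List Char)) : List (List Char) :=
  if h : s = [] then parts
  else peelChunks (s.take (s.length - 3)) (parts ++ [s.drop (s.length - 3)])
termination_by s.length
decreasing_by
  have hpos : s.length ≠ 0 := by simpa [List.length_eq_zero_iff] using h
  simp [List.length_take]; omega

-- ','.join(...) ported by hand (exact: Python's str.join on nonempty strings)
def joinComma (ps : List (List Char)) : List Char :=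
  match ps with
  | [] => []
  | [p] => p
  | p :: ps => p ++ ',' :: joinComma ps

def group_by_commas_alt (n : Int) : String :=
  let s := (PySem.Int.toStr n).toList
  String.mk (joinComma (peelChunks s []).reverse)

-- ===== PRECONDITION & SPEC =====
def Spec_group_by_commas (n : Int) (out : String) : Prop := out = group_by_commas_alt n
instance (n : Int) (out : String) : Decidable (Spec_group_by_commas n out) := by unfold Spec_group_by_commas; infer_instance

-- ===== CLAIM (what is proved, stated in full; the proofs are below) =====
def Claim_equal_group_by_commas : Prop := ∀ (n : Int), Dom_group_by_commas n → Spec_group_by_commas n (group_by_commas n)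

-- ===== LEMMAS AND PROOFS =====

-- g: A's loop body as structural recursion carrying the index
def g (x : List Char) (i : Nat) : List Char :=
  match x with
  | [] => []
  | c :: t => (if i % 3 == 0 && i != 0 then [','] else []) ++ c :: g t (i + 1)

-- gg: grouped ('every 3, comma-prefixed') form of g at a nonzero multiple of 3
def gg (x : List Char) : List Char :=
  if x = [] then [] else ',' :: (x.take 3 ++ gg (x.drop 3))
termination_by x.length
decreasing_by cases x with
  | nil => simp_all
  | cons a t => simp

theorem aLoop_eq_g : ∀ (k : Nat) (x : List Char) (i : Nat) (res : List Char), x.length - i = k →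
    aLoop x i res = res ++ g (x.drop i) i := by
  intro k
  induction k with
  | zero =>
    intro x i res h
    rw [aLoop]
    have hle : x.length ≤ i := by omega
    simp [Nat.not_lt.mpr hle, List.drop_eq_nil_of_le hle, g]
  | succ k ih =>
    intro x i res h
    rw [aLoop]
    by_cases hi : i < x.length
    · simp only [hi, if_true]
      rw [ih x (i + 1) _ (by omega)]
      have hdrop : x.drop i = x.getD i ' ' :: x.drop (i + 1) := by
        rw [List.drop_eq_getElem_cons hi, List.getD_eq_getElem x ' ' hi]
      rw [hdrop, g]
      by_cases hc : (i % 3 == 0 && i != 0) = true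
      · simp [hc]
      · simp [hc]
    · have hle : x.length ≤ i := by omega
      simp [hi, List.drop_eq_nil_of_le hle, g]

theorem g_three (x : List Char) (i : Nat) (h3 : i % 3 = 0) (h0 : i ≠ 0) :
    g x i = gg x := by
  induction hx : x.length using Nat.strong_induction_on generalizing x i with
  | _ k ih =>
  have hc : (i % 3 == 0 && i != 0) = true := by simp [h3, h0]
  have h1 : ((i + 1) % 3 == 0 && (i + 1) != 0) = false := by
    simp only [Bool.and_eq_false_iff, beq_eq_false_iff_ne, ne_eq]
    left; omega
  have h2 : ((i + 2) % 3 == 0 && (i + 2) != 0) = false := by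
    simp only [Bool.and_eq_false_iff, beq_eq_false_iff_ne, ne_eq]
    left; omega
  match x with
  | [] => simp [g, gg]
  | [a] => simp [g, gg, hc, h1]
  | [a, b] =>
    simp [g, gg, hc, h1, h2]
    omega
  | a :: b :: c :: t =>
    have hih := ih t.length (by subst hx; simp; omega) t (i + 3) (by omega) (by omega) rfl
    have hp1 : ¬(i + 1) % 3 = 0 := by omega
    have hp2 : ¬(i + 1 + 1) % 3 = 0 := by omega
    rw [gg, if_neg (by simp)]
    simp [g, hc, h1, h2, hih, hp1, hp2]

theorem g_zero (x : List Char) : g x 0 = x.take 3 ++ gg (x.drop 3) := by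
  match x with
  | [] => simp [g, gg]
  | [a] => simp [g, gg]
  | [a, b] => simp [g, gg]
  | a :: b :: c :: t =>
    simp only [g, List.take, List.drop]
    rw [g_three t 3 (by norm_num) (by norm_num)]
    simp

theorem gg_eq (y : List Char) (hy : y ≠ []) : gg y = ',' :: g y 0 := by
  rw [gg, g_zero, if_neg hy]

theorem peelChunks_acc (s : List Char) (p : List (List Char)) :
    peelChunks s p = p ++ peelChunks s [] := by
  induction hx : s.length using Nat.strong_induction_on generalizing s p with
  | _ k ih =>
  by_cases hs : s = []
  · simp [hs, peelChunks]
  · have hA : peelChunks s p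
        = peelChunks (s.take (s.length - 3)) (p ++ [s.drop (s.length - 3)]) := by
      rw [peelChunks, dif_neg hs]
    have hB : peelChunks s []
        = peelChunks (s.take (s.length - 3)) ([s.drop (s.length - 3)]) := by
      rw [peelChunks, dif_neg hs]; simp
    have hpos : s.length ≠ 0 := by simpa [List.length_eq_zero_iff] using hs
    have hlen : (s.take (s.length - 3)).length < k := by
      subst hx; simp [List.length_take]; omega
    rw [hA, hB, ih _ hlen _ _ rfl, ih _ hlen _ ([s.drop (s.length - 3)]) rfl]
    simp

theorem peelChunks_ne_nil (s : List Char) (hs : s ≠ []) : peelChunks s [] ≠ [] := by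
  rw [peelChunks, dif_neg hs, peelChunks_acc]
  simp

theorem joinComma_append_last (ps : List (List Char)) (q : List Char) (h : ps ≠ []) :
    joinComma (ps ++ [q]) = joinComma ps ++ ',' :: q := by
  induction ps with
  | nil => simp_all
  | cons p ps ih =>
    cases ps with
    | nil => simp [joinComma]
    | cons r rs =>
      have := ih (by simp)
      simp only [List.cons_append, joinComma] at this ⊢
      rw [this]
      simp

theorem main_lemma (l : List Char) :
    joinComma (peelChunks l []).reverse = (g l.reverse 0).reverse := by
  induction hx : l.length using Nat.strong_induction_on generalizing l with
  | _ k ih =>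
  by_cases hnil : l = []
  · simp [hnil, peelChunks, joinComma, g]
  · rw [peelChunks, dif_neg hnil, peelChunks_acc]
    by_cases hlen : l.length ≤ 3
    · have h0 : l.length - 3 = 0 := by omega
      rw [h0, List.take_zero, List.drop_zero]
      rw [show peelChunks ([] : List Char) [] = [] from by rw [peelChunks]; simp]
      simp only [List.nil_append, List.append_nil, List.reverse_singleton, joinComma]
      rw [g_zero]
      have hd3 : l.reverse.drop 3 = [] := List.drop_eq_nil_of_le (by simp; omega)
      have ht3 : l.reverse.take 3 = l.reverse := List.take_of_length_le (by simp; omega)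
      rw [hd3, ht3, gg, if_pos rfl]
      simp
    · have hm : 0 < l.length - 3 := by omega
      have htne : l.take (l.length - 3) ≠ [] := by
        intro hcon
        have := congrArg List.length hcon
        simp [List.length_take] at this
        omega
      have hPne : peelChunks (l.take (l.length - 3)) [] ≠ [] := peelChunks_ne_nil _ htne
      have hrec := ih (l.take (l.length - 3)).length
        (by subst hx; simp [List.length_take]; omega) (l.take (l.length - 3)) rfl
      have hPrev : (peelChunks (l.take (l.length - 3)) []).reverse ≠ [] := by
        simpa using hPne
      rw [List.nil_append, List.reverse_append, List.reverse_singleton]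
      rw [joinComma_append_last _ _ hPrev, hrec]
      conv_rhs => rw [g_zero]
      have e1 : l.reverse.take 3 = (l.drop (l.length - 3)).reverse := by
        rw [List.reverse_drop]
        congr 1
        omega
      have e2 : l.reverse.drop 3 = (l.take (l.length - 3)).reverse := by
        rw [List.reverse_take]
        congr 1
        omega
      have hrne : (l.take (l.length - 3)).reverse ≠ [] := by simpa using htne
      rw [e1, e2, gg_eq _ hrne]
      simp

-- ===== VERDICT (by name: the statement is the Claim_ definition above) =====
theorem group_by_commas_spec : Claim_equal_group_by_commas := by
  intro n _
  unfold Spec_group_by_commas group_by_commas group_by_commas_alt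
  simp only []
  rw [aLoop_eq_g ((PySem.Int.toStr n).toList.reverse.length - 0) _ 0 [] rfl]
  rw [List.drop_zero, List.nil_append, main_lemma]
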